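-- pv_equiv track=rewrite | github.com/pawan9489/PythonTraining | Chapter-3/14.Sample.py | result
-- ===== SOURCE A (Python) =====
-- def result(s):
--     vLen = 0
--     cLen = 0
--     vowels = ['a', 'e', 'i', 'o', 'u', 'A', 'E', 'I', 'O', 'U']
--     l = len(s)
--     for i in range(1, l + 1): # Size of SubString
--         for j in range(0, l):
--             if j + i <= l:
--                 # t = s[j: j + i]
--                 if s[j] in vowels:
--                     vLen += 1
--                 else:
--                     cLen += 1
--     return "Draw" if vLen == cLen else "Kevin {0}".format(vLen) if vLen > cLen else "Stuart {0}".format(cLen)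
-- ===== SOURCE B (Python) =====
-- def result(s):
--     l = len(s)
--     v = 0
--     c = 0
--     for j, ch in enumerate(s):
--         w = l - j
--         if ch in "aeiouAEIOU":
--             v += w
--         else:
--             c += w
--     return "Draw" if v == c else "Kevin {0}".format(v) if v > c else "Stuart {0}".format(c)
-- ===== Notes on version B (the rewrite author's own statement) =====
-- stated objective: faster
-- what changed: Replaced the double loop over substring sizes and start positions by a single pass that adds weight (len(s)-j) for each character position j, since position j is visited once per size i with j+i<=len(s).
import Mathlib
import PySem

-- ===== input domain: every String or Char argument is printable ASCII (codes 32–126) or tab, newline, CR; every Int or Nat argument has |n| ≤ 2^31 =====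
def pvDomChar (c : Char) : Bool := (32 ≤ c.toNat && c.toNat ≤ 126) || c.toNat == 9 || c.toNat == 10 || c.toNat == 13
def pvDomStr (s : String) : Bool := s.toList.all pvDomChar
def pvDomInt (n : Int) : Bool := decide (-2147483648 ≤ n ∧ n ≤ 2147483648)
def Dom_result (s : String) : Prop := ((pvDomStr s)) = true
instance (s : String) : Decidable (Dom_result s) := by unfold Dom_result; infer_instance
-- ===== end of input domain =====

-- B replaces A's O(n^2) double loop by one pass adding weight (len-j) per position j (faster, asymptotic).

-- ===== PORT A =====
-- Python s[j] is always in range here (0 ≤ j < len(s)), so pyGetD with a dummy default is exact.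
def pvVowelsA : List Char := ['a', 'e', 'i', 'o', 'u', 'A', 'E', 'I', 'O', 'U']

-- A's double loop over (vLen, cLen)
def pvLoopA (cs : List Char) (l : Int) : Int × Int :=
  (PySem.List.pyRange 1 (l + 1) 1).foldl (fun (p : Int × Int) i =>
    (PySem.List.pyRange 0 l 1).foldl (fun (q : Int × Int) j =>
      if j + i ≤ l then
        if PySem.List.pyGetD cs j ' ' ∈ pvVowelsA then (q.1 + 1, q.2)
        else (q.1, q.2 + 1)
      else q) p) (0, 0)

def result (s : String) : String :=
  let l : Int := PySem.Str.len s
  let st : Int × Int := pvLoopA s.toList l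
  if st.1 = st.2 then "Draw"
  else if st.1 > st.2 then "Kevin " ++ PySem.Int.toStr st.1
  else "Stuart " ++ PySem.Int.toStr st.2

-- ===== PORT B =====
-- B's single pass over (v, c)
def pvLoopB (cs : List Char) (l : Int) : Int × Int :=
  (PySem.List.enumerate cs 0).foldl (fun (p : Int × Int) jc =>
    let w : Int := l - jc.1
    if jc.2 ∈ "aeiouAEIOU".toList then (p.1 + w, p.2)
    else (p.1, p.2 + w)) (0, 0)

def result_alt (s : String) : String :=
  let l : Int := PySem.Str.len s
  let st : Int × Int := pvLoopB s.toList l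
  if st.1 = st.2 then "Draw"
  else if st.1 > st.2 then "Kevin " ++ PySem.Int.toStr st.1
  else "Stuart " ++ PySem.Int.toStr st.2

-- ===== PRECONDITION & SPEC =====
def Spec_result (s : String) (out : String) : Prop := out = result_alt s
instance (s : String) (out : String) : Decidable (Spec_result s out) := by unfold Spec_result; infer_instance

-- ===== CLAIM (what is proved, stated in full; the proofs are below) =====
def Claim_equal_result : Prop := ∀ (s : String), Dom_result s → Spec_result s (result s)

-- ===== LEMMAS AND PROOFS =====

theorem list_sum_range (n : ℕ) (f : ℕ → ℤ) :
    ((List.range n).map f).sum = ∑ i ∈ Finset.range n, f i := rfl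

theorem sum_indicator (n m : ℕ) (h : m ≤ n) :
    (∑ k ∈ Finset.range n, if k < m then (1 : ℤ) else 0) = (m : ℤ) := by
  induction n with
  | zero => interval_cases m; simp
  | succ n ih =>
    rw [Finset.sum_range_succ]
    by_cases hm : m ≤ n
    · rw [ih hm, if_neg (by omega)]; ring
    · have hm' : m = n + 1 := by omega
      subst hm'
      rw [if_pos (by omega)]
      have : ∀ k ∈ Finset.range n, (if k < n + 1 then (1 : ℤ) else 0) = 1 := by
        intro k hk; rw [if_pos (by simp at hk; omega)]
      rw [Finset.sum_congr rfl this]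
      simp

theorem comp_sum (n : ℕ) (P : ℤ → Prop) [DecidablePred P] :
    (∑ k ∈ Finset.range n, ∑ j ∈ Finset.range n,
        if ((j : ℤ) + (1 + (k : ℤ)) ≤ (n : ℤ) ∧ P (j : ℤ)) then (1 : ℤ) else 0)
      = ∑ j ∈ Finset.range n, if P (j : ℤ) then (n : ℤ) - (j : ℤ) else 0 := by
  rw [Finset.sum_comm]
  refine Finset.sum_congr rfl (fun j hj => ?_)
  rw [Finset.mem_range] at hj
  by_cases hp : P (j : ℤ)
  · simp only [hp, and_true, if_pos]
    have hcong : ∀ k ∈ Finset.range n,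
        (if ((j : ℤ) + (1 + (k : ℤ)) ≤ (n : ℤ)) then (1 : ℤ) else 0)
          = (if k < n - j then (1 : ℤ) else 0) := by
      intro k _
      exact if_congr (by omega) rfl rfl
    rw [Finset.sum_congr rfl hcong, sum_indicator n (n - j) (by omega)]
    omega
  · simp [hp]

theorem pvLoop_eq (cs : List Char) :
    pvLoopA cs (cs.length : Int) = pvLoopB cs (cs.length : Int) := by
  unfold pvLoopA pvLoopB
  set n := cs.length with hn
  have hvow : "aeiouAEIOU".toList = pvVowelsA := by decide
  rw [hvow]
  -- componentwise forms
  have hstepB : (fun (p : Int × Int) (jc : Int × Char) =>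
      let w : Int := (n : Int) - jc.1
      if jc.2 ∈ pvVowelsA then (p.1 + w, p.2) else (p.1, p.2 + w))
    = fun p jc => (p.1 + (if jc.2 ∈ pvVowelsA then (n : Int) - jc.1 else 0),
                   p.2 + (if jc.2 ∈ pvVowelsA then 0 else (n : Int) - jc.1)) := by
    funext p jc; by_cases h : jc.2 ∈ pvVowelsA <;> simp [h]
  have hstepA : ∀ i : Int, (fun (q : Int × Int) (j : Int) =>
      if j + i ≤ (n : Int) then
        if PySem.List.pyGetD cs j ' ' ∈ pvVowelsA then (q.1 + 1, q.2) else (q.1, q.2 + 1)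
      else q)
    = fun q j => (q.1 + (if j + i ≤ (n : Int) ∧ PySem.List.pyGetD cs j ' ' ∈ pvVowelsA then 1 else 0),
                  q.2 + (if j + i ≤ (n : Int) ∧ PySem.List.pyGetD cs j ' ' ∉ pvVowelsA then 1 else 0)) := by
    intro i; funext q j
    by_cases h1 : j + i ≤ (n : Int) <;> by_cases h2 : PySem.List.pyGetD cs j ' ' ∈ pvVowelsA <;>
      simp [h1, h2]
  rw [hstepB]
  rw [PySem.List.foldl_prod_mk (f := fun a (jc : Int × Char) => a + (if jc.2 ∈ pvVowelsA then (n:Int) - jc.1 else 0))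
      (g := fun a (jc : Int × Char) => a + (if jc.2 ∈ pvVowelsA then 0 else (n:Int) - jc.1))]
  have hinner : ∀ (p : Int × Int) (i : Int),
      (PySem.List.pyRange 0 (n : Int) 1).foldl (fun (q : Int × Int) (j : Int) =>
        if j + i ≤ (n : Int) then
          if PySem.List.pyGetD cs j ' ' ∈ pvVowelsA then (q.1 + 1, q.2) else (q.1, q.2 + 1)
        else q) p
      = (p.1 + ((PySem.List.pyRange 0 (n : Int) 1).map (fun j => if j + i ≤ (n : Int) ∧ PySem.List.pyGetD cs j ' ' ∈ pvVowelsA then (1:Int) else 0)).sum,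
         p.2 + ((PySem.List.pyRange 0 (n : Int) 1).map (fun j => if j + i ≤ (n : Int) ∧ PySem.List.pyGetD cs j ' ' ∉ pvVowelsA then (1:Int) else 0)).sum) := by
    intro p i
    rw [hstepA i]
    rw [PySem.List.foldl_prod_mk
      (f := fun a j => a + (if j + i ≤ (n : Int) ∧ PySem.List.pyGetD cs j ' ' ∈ pvVowelsA then (1:Int) else 0))
      (g := fun a j => a + (if j + i ≤ (n : Int) ∧ PySem.List.pyGetD cs j ' ' ∉ pvVowelsA then (1:Int) else 0))]
    rw [PySem.List.foldl_add, PySem.List.foldl_add]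
  have houter : (PySem.List.pyRange 1 ((n : Int) + 1) 1).foldl (fun (p : Int × Int) (i : Int) =>
      (PySem.List.pyRange 0 (n : Int) 1).foldl (fun (q : Int × Int) (j : Int) =>
        if j + i ≤ (n : Int) then
          if PySem.List.pyGetD cs j ' ' ∈ pvVowelsA then (q.1 + 1, q.2) else (q.1, q.2 + 1)
        else q) p) (0, 0)
    = (PySem.List.pyRange 1 ((n : Int) + 1) 1).foldl (fun (p : Int × Int) (i : Int) =>
      (p.1 + ((PySem.List.pyRange 0 (n : Int) 1).map (fun j => if j + i ≤ (n : Int) ∧ PySem.List.pyGetD cs j ' ' ∈ pvVowelsA then (1:Int) else 0)).sum,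
       p.2 + ((PySem.List.pyRange 0 (n : Int) 1).map (fun j => if j + i ≤ (n : Int) ∧ PySem.List.pyGetD cs j ' ' ∉ pvVowelsA then (1:Int) else 0)).sum)) (0, 0) :=
    PySem.List.foldl_congr_mem _ _ _ _ (fun p i _ => hinner p i)
  rw [houter]
  rw [PySem.List.foldl_prod_mk
    (f := fun a (i : Int) => a + ((PySem.List.pyRange 0 (n : Int) 1).map (fun j => if j + i ≤ (n : Int) ∧ PySem.List.pyGetD cs j ' ' ∈ pvVowelsA then (1:Int) else 0)).sum)
    (g := fun a (i : Int) => a + ((PySem.List.pyRange 0 (n : Int) 1).map (fun j => if j + i ≤ (n : Int) ∧ PySem.List.pyGetD cs j ' ' ∉ pvVowelsA then (1:Int) else 0)).sum)]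
  rw [PySem.List.foldl_add, PySem.List.foldl_add, PySem.List.foldl_add, PySem.List.foldl_add]
  rw [PySem.List.enumerate_eq_map_pyRange cs ' ']
  simp only [List.map_map, PySem.List.len_eq, PySem.List.pyRange_one]
  simp only [list_sum_range]
  simp only [add_sub_cancel_right, sub_zero, Int.toNat_natCast, Function.comp_def, zero_add, ← hn]
  rw [Prod.mk.injEq]
  constructor
  · exact comp_sum n (fun x => PySem.List.pyGetD cs x ' ' ∈ pvVowelsA)
  · have hflip : ∀ j ∈ Finset.range n,
        (if PySem.List.pyGetD cs (j : ℤ) ' ' ∈ pvVowelsA then (0 : ℤ) else (n : ℤ) - (j : ℤ))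
          = (if PySem.List.pyGetD cs (j : ℤ) ' ' ∉ pvVowelsA then (n : ℤ) - (j : ℤ) else 0) := by
      intro j _
      by_cases h : PySem.List.pyGetD cs (j : ℤ) ' ' ∈ pvVowelsA
      · rw [if_pos h, if_neg (not_not_intro h)]
      · rw [if_neg h, if_pos h]
    rw [Finset.sum_congr rfl hflip]
    exact comp_sum n (fun x => PySem.List.pyGetD cs x ' ' ∉ pvVowelsA)

-- ===== VERDICT (by name: the statement is the Claim_ definition above) =====
theorem result_spec : Claim_equal_result := by
  intro s _
  unfold Spec_result result result_alt
  simp only [PySem.Str.len_eq]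
  rw [pvLoop_eq s.toList]
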